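-- pv_equiv track=rewrite | github.com/prestonbrubaker/archipelago | archipelago/client_backend.py | write_byte
-- ===== SOURCE A (Python) =====
-- def write_byte(list_in, index_in, num_lines_in, value_in):  # Takes in a list and a value and converts the value to binary and overwrites the current selection with the value
--   for i in range(0, 8 * num_lines_in):  # Overwrite current contents with 0
--     index_i = i + index_in * 8
--     if(index_i == len(list_in)):
--       list_in.append(0)      # This will expand the list if new information is being added to the end of list_in
--     elif(index_i > len(list_in)):
--       return list_in
--     else:
--       list_in[i + index_in * 8] = 0
--   for i in range(0, 8 * num_lines_in):
--     value = 2**(8 * num_lines_in - 1 - i)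
--     if(value_in >= value):
--       list_in[i + index_in * 8] = 1
--       value_in -= value
--   return list_in
-- ===== SOURCE B (Python) =====
-- def write_byte(list_in, index_in, num_lines_in, value_in):
--     n = 8 * num_lines_in
--     if n <= 0:
--         return list_in
--     start = index_in * 8
--     if start > len(list_in):
--         return list_in
--     v = min(max(value_in, 0), 2 ** n - 1)   # greedy subtraction saturates: clamp, then read bits
--     bits = [v // 2 ** (n - 1 - j) % 2 for j in range(n)]
--     list_in[start:start + n] = bits
--     return list_in
-- ===== Notes on version B (the rewrite author's own statement) =====
-- stated objective: simpler
-- what changed: Replaces A's two mutation passes (zeroing loop with incremental append, then greedy power-of-two subtraction) by a closed-form bit list (clamp the value to [0, 2^n-1], read each bit by division) written in with one slice assignment.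
import Mathlib
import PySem

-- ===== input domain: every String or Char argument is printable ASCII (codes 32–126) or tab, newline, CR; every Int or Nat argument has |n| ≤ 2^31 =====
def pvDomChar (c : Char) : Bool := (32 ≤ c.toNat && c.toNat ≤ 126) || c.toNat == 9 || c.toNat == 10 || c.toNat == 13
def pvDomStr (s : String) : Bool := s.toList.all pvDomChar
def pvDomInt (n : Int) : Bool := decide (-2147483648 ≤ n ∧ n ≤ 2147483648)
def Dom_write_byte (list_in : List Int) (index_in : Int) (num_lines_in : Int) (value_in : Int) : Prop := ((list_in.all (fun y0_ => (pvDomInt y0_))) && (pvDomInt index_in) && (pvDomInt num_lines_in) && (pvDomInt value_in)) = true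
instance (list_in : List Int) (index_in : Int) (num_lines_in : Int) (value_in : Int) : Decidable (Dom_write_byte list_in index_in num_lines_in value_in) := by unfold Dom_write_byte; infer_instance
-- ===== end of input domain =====

-- B replaces A's two in-place passes (zero-fill loop, then greedy power-of-two subtraction) by one
-- closed-form bit list (clamp value to [0, 2^n - 1], read bits by division) written with a single
-- slice assignment (objective: simpler). Equivalence is about the RETURN value; both Pythons also
-- mutate list_in in place.


-- ===== PORT A =====
-- body of A's first loop; Sum.inr marks that A's `return list_in` has executed (remaining iterations skipped)
def pvStepA (index_in : Int) (acc : Sum (List Int) (List Int)) (i : Int) : Sum (List Int) (List Int) :=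
  match acc with
  | Sum.inr l => Sum.inr l
  | Sum.inl l =>
    let index_i := i + index_in * 8
    if index_i = (l.length : Int) then Sum.inl (l ++ [0])
    else if index_i > (l.length : Int) then Sum.inr l
    else Sum.inl (PySem.List.pySetD l index_i 0)  -- exact for 0 ≤ index_i, the only case reachable under Pre_

-- body of A's second loop, state = (list_in, value_in)
def pvStepA2 (index_in : Int) (num_lines_in : Int) (st : List Int × Int) (i : Int) : List Int × Int :=
  let value : Int := 2 ^ (8 * num_lines_in - 1 - i).toNat  -- exponent is ≥ 0 for every i in the range
  if st.2 ≥ value then (PySem.List.pySetD st.1 (i + index_in * 8) 1, st.2 - value) else st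

def write_byte (list_in : List Int) (index_in : Int) (num_lines_in : Int) (value_in : Int) : List Int :=
  match (PySem.List.pyRange 0 (8 * num_lines_in) 1).foldl (pvStepA index_in) (Sum.inl list_in) with
  | Sum.inr l => l
  | Sum.inl l =>
      ((PySem.List.pyRange 0 (8 * num_lines_in) 1).foldl (pvStepA2 index_in num_lines_in) (l, value_in)).1

-- ===== PORT B =====
def write_byte_alt (list_in : List Int) (index_in : Int) (num_lines_in : Int) (value_in : Int) : List Int :=
  let n := 8 * num_lines_in
  if n ≤ 0 then list_in
  else
    let start := index_in * 8
    if start > (list_in.length : Int) then list_in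
    else
      let v := min (max value_in 0) (2 ^ n.toNat - 1)
      let bits := (PySem.List.pyRange 0 n 1).map
        (fun j => PySem.Int.mod (PySem.Int.floordiv v (2 ^ (n - 1 - j).toNat)) 2)
      -- slice assignment list_in[start:start+n] = bits; exact for 0 ≤ start ≤ len (the only case reachable here under Pre_)
      list_in.take start.toNat ++ bits ++ list_in.drop (start + n).toNat

-- ===== PRECONDITION & SPEC =====
-- Pre_ excludes negative index_in with positive num_lines_in: there A either raises IndexError
-- (when the list is shorter than 8*|index_in|) or performs accidental negative-index wraparound
-- writes, a corner no caller would specify and on which B's slice semantics are equally defensible.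
def Pre_write_byte (list_in : List Int) (index_in : Int) (num_lines_in : Int) (value_in : Int) : Prop :=
  0 ≤ index_in ∨ num_lines_in ≤ 0
instance (list_in : List Int) (index_in : Int) (num_lines_in : Int) (value_in : Int) : Decidable (Pre_write_byte list_in index_in num_lines_in value_in) := by unfold Pre_write_byte; infer_instance

def pvWitness_write_byte : List Int × Int × Int × Int := ([0, 1, 0, 1, 1, 0, 0, 0], 0, 1, 77)

def Spec_write_byte (list_in : List Int) (index_in : Int) (num_lines_in : Int) (value_in : Int) (out : List Int) : Prop := out = write_byte_alt list_in index_in num_lines_in value_in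
instance (list_in : List Int) (index_in : Int) (num_lines_in : Int) (value_in : Int) (out : List Int) : Decidable (Spec_write_byte list_in index_in num_lines_in value_in out) := by unfold Spec_write_byte; infer_instance

-- ===== CLAIM (what is proved, stated in full; the proofs are below) =====
def Claim_equal_write_byte : Prop := ∀ (list_in : List Int) (index_in : Int) (num_lines_in : Int) (value_in : Int), Dom_write_byte list_in index_in num_lines_in value_in → Pre_write_byte list_in index_in num_lines_in value_in → Spec_write_byte list_in index_in num_lines_in value_in (write_byte list_in index_in num_lines_in value_in)

-- ===== LEMMAS AND PROOFS =====

-- greedy power-of-two subtraction over k bit positions (A's second loop, abstracted)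
def pvGreedy : Nat → Int → List Int
  | 0, _ => []
  | k+1, v => if v ≥ 2 ^ k then 1 :: pvGreedy k (v - 2 ^ k) else 0 :: pvGreedy k v

-- the bit list B computes (with ediv/emod; the divisors are positive powers of two)
def pvBits (N : Nat) (c : Int) : List Int :=
  (List.range N).map (fun j => c / 2 ^ (N - 1 - j) % 2)

lemma pvBits_cons (N : Nat) (c : Int) : pvBits (N+1) c = (c / 2 ^ N % 2) :: pvBits N c := by
  unfold pvBits
  rw [List.range_succ_eq_map, List.map_cons, List.map_map]
  congr 1
  refine List.map_congr_left ?_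
  intro a _
  simp only [Function.comp_def]
  have h : N + 1 - 1 - (a + 1) = N - 1 - a := by omega
  rw [h]

lemma pvBits_add_pow_mul (N : Nat) (c t : Int) : pvBits N (c + 2 ^ N * t) = pvBits N c := by
  unfold pvBits
  refine List.map_congr_left ?_
  intro j hj
  rw [List.mem_range] at hj
  have hsplit : (2:Int) ^ N * t = 2 ^ (N - 1 - j) * (2 ^ (j + 1) * t) := by
    rw [← mul_assoc, ← pow_add]
    congr 2
    omega
  rw [hsplit, Int.add_mul_ediv_left _ _ (by positivity)]
  have h2 : (2:Int) ^ (j + 1) * t = 2 * (2 ^ j * t) := by ring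
  rw [h2, Int.add_mul_emod_self_left]

lemma pvGreedy_eq_bits (k : Nat) (v : Int) :
    pvGreedy k v = pvBits k (min (max v 0) (2 ^ k - 1)) := by
  induction k generalizing v with
  | zero => simp [pvGreedy, pvBits]
  | succ k ih =>
    rw [pvGreedy]
    have hpow : (0:Int) < 2 ^ k := by positivity
    have h2 : (2:Int) ^ (k+1) = 2 ^ k + 2 ^ k := by ring
    obtain ⟨c, hcdef⟩ : ∃ c : Int, c = min (max v 0) (2 ^ (k+1) - 1) := ⟨_, rfl⟩
    rw [pvBits_cons, ← hcdef]
    by_cases hv : v ≥ 2 ^ k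
    · rw [if_pos hv]
      have hlo : 2 ^ k ≤ c := by rw [hcdef]; omega
      have hhi : c < 2 ^ (k+1) := by rw [hcdef]; omega
      have hdiv : c / 2 ^ k = 1 := by
        have h1 : c - 2 ^ k + 1 * 2 ^ k = c := by ring
        have h0 : (c - 2 ^ k) / 2 ^ k = 0 := Int.ediv_eq_zero_of_lt (by omega) (by omega)
        calc c / 2 ^ k = (c - 2 ^ k + 1 * 2 ^ k) / 2 ^ k := by rw [h1]
          _ = (c - 2 ^ k) / 2 ^ k + 1 := Int.add_mul_ediv_right _ _ (by positivity)
          _ = 1 := by omega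
      have htail : pvBits k (c - 2 ^ k) = pvBits k c := by
        conv_rhs => rw [show c = (c - 2 ^ k) + 2 ^ k * 1 by ring]
        exact (pvBits_add_pow_mul k (c - 2 ^ k) 1).symm
      have hcsub : c - 2 ^ k = min (max (v - 2 ^ k) 0) (2 ^ k - 1) := by rw [hcdef]; omega
      rw [hdiv, ih, ← hcsub, htail]
      norm_num
    · rw [if_neg hv]
      push_neg at hv
      have hc0 : c = max v 0 := by rw [hcdef]; omega
      have hc2 : min (max v 0) (2 ^ k - 1) = c := by rw [hcdef]; omega
      have hdiv : c / 2 ^ k = 0 :=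
        Int.ediv_eq_zero_of_lt (by omega) (by omega)
      rw [hdiv, ih, hc2]
      norm_num

-- once A's early `return` has fired, the rest of the first loop is a no-op
lemma pvStepA_inr (index_in : Int) (xs : List Int) (l : List Int) :
    xs.foldl (pvStepA index_in) (Sum.inr l) = Sum.inr l := by
  induction xs with
  | nil => rfl
  | cons x xs ih => simpa [pvStepA] using ih

-- A's first loop zero-fills (and extends) positions pre.length .. pre.length + k - 1
lemma pvLoop1 (k : Nat) : ∀ (a index_in : Int) (pre suf : List Int),
    a + index_in * 8 = (pre.length : Int) →
    (PySem.List.pyRange a (a + k) 1).foldl (pvStepA index_in) (Sum.inl (pre ++ suf))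
      = Sum.inl (pre ++ List.replicate k 0 ++ suf.drop k) := by
  induction k with
  | zero =>
    intro a index_in pre suf _
    rw [show a + ((0:Nat):Int) = a by omega, PySem.List.pyRange_one_eq_nil le_rfl]
    simp
  | succ k ih =>
    intro a index_in pre suf hidx
    rw [PySem.List.pyRange_one_cons (by omega : a < a + ((k+1:Nat):Int))]
    rw [List.foldl_cons]
    have hstep : pvStepA index_in (Sum.inl (pre ++ suf)) a
        = Sum.inl ((pre ++ [0]) ++ suf.drop 1) := by
      unfold pvStepA
      simp only [hidx]
      cases suf with
      | nil => simp
      | cons x suf' =>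
        have hlen : ((pre.length : Int)) ≠ (((pre ++ x :: suf').length : Nat) : Int) := by
          simp; omega
        rw [if_neg hlen, if_neg (by simp; omega)]
        rw [PySem.List.pySetD_natCast]
        rw [List.set_append_right _ _ le_rfl]
        simp
    rw [hstep]
    have hrange : PySem.List.pyRange (a+1) (a + ((k+1:Nat):Int)) 1
        = PySem.List.pyRange (a+1) ((a+1) + ((k:Nat):Int)) 1 := by
      congr 1; push_cast; ring
    rw [hrange, ih (a+1) index_in (pre ++ [0]) (suf.drop 1) (by simp; omega)]
    cases suf with
    | nil => simp [List.replicate_succ]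
    | cons x suf' => simp [List.replicate_succ]

-- A's second loop writes the greedy bit pattern over the zero-filled block
lemma pvLoop2 (k : Nat) : ∀ (a index_in num_lines_in : Int) (pre suf : List Int) (v : Int),
    a + index_in * 8 = (pre.length : Int) → 8 * num_lines_in = a + k →
    ((PySem.List.pyRange a (a + k) 1).foldl (pvStepA2 index_in num_lines_in)
        (pre ++ List.replicate k 0 ++ suf, v)).1
      = pre ++ pvGreedy k v ++ suf := by
  induction k with
  | zero =>
    intro a index_in num_lines_in pre suf v _ _
    rw [show a + ((0:Nat):Int) = a by omega, PySem.List.pyRange_one_eq_nil le_rfl]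
    simp [pvGreedy]
  | succ k ih =>
    intro a index_in num_lines_in pre suf v hidx hn
    rw [PySem.List.pyRange_one_cons (by omega : a < a + ((k+1:Nat):Int))]
    rw [List.foldl_cons]
    have hexp : (8 * num_lines_in - 1 - a).toNat = k := by omega
    have hset : PySem.List.pySetD (pre ++ List.replicate (k+1) 0 ++ suf) (a + index_in * 8) 1
        = (pre ++ [1]) ++ List.replicate k 0 ++ suf := by
      rw [hidx, PySem.List.pySetD_natCast]
      rw [List.append_assoc, List.set_append_right _ _ le_rfl]
      simp [List.replicate_succ]
    have hrange : PySem.List.pyRange (a+1) (a + ((k+1:Nat):Int)) 1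
        = PySem.List.pyRange (a+1) ((a+1) + ((k:Nat):Int)) 1 := by
      congr 1; push_cast; ring
    by_cases hv : v ≥ 2 ^ k
    · have hstep : pvStepA2 index_in num_lines_in (pre ++ List.replicate (k+1) 0 ++ suf, v) a
          = ((pre ++ [1]) ++ List.replicate k 0 ++ suf, v - 2 ^ k) := by
        simp only [pvStepA2, hexp]
        rw [if_pos hv, hset]
      rw [hstep, hrange, ih (a+1) index_in num_lines_in (pre ++ [1]) suf (v - 2 ^ k)
        (by simp; omega) (by push_cast at hn ⊢; omega)]
      rw [pvGreedy, if_pos hv]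
      simp
    · have hstep : pvStepA2 index_in num_lines_in (pre ++ List.replicate (k+1) 0 ++ suf, v) a
          = (pre ++ List.replicate (k+1) 0 ++ suf, v) := by
        simp only [pvStepA2, hexp]
        rw [if_neg hv]
      have hsplit : pre ++ List.replicate (k+1) 0 ++ suf
          = (pre ++ [0]) ++ List.replicate k 0 ++ suf := by
        simp [List.replicate_succ]
      rw [hstep, hsplit, hrange, ih (a+1) index_in num_lines_in (pre ++ [0]) suf v
        (by simp; omega) (by push_cast at hn ⊢; omega)]
      rw [pvGreedy, if_neg hv]
      simp

-- B's bit list is pvBits of the clamped value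
lemma pvBitsB (num_lines_in v : Int) (hpos : 0 < 8 * num_lines_in) :
    ((PySem.List.pyRange 0 (8 * num_lines_in) 1).map
        (fun j => PySem.Int.mod (PySem.Int.floordiv v (2 ^ (8 * num_lines_in - 1 - j).toNat)) 2))
      = pvBits (8 * num_lines_in).toNat v := by
  rw [PySem.List.pyRange_one, pvBits, List.map_map]
  rw [show (8 * num_lines_in - 0) = 8 * num_lines_in by ring]
  refine List.map_congr_left ?_
  intro j hj
  rw [List.mem_range] at hj
  simp only [Function.comp_def, zero_add]
  have hexp : (8 * num_lines_in - 1 - (j:Int)).toNat = (8 * num_lines_in).toNat - 1 - j := by omega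
  rw [hexp,
    PySem.Int.floordiv_eq_ediv_of_pos (by positivity),
    PySem.Int.mod_eq_emod_of_pos (by norm_num)]

-- ===== VERDICT (by name: the statement is the Claim_ definition above) =====
theorem write_byte_spec : Claim_equal_write_byte := by
  intro list_in index_in num_lines_in value_in _ hPre
  unfold Spec_write_byte write_byte write_byte_alt
  by_cases hn : 8 * num_lines_in ≤ 0
  · -- empty ranges on both sides
    rw [PySem.List.pyRange_one_eq_nil hn]
    simp [hn]
  · push_neg at hn
    have hidx : 0 ≤ index_in := by
      rcases hPre with h | h
      · exact h
      · exfalso; omega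
    simp only [if_neg (by omega : ¬ 8 * num_lines_in ≤ 0)]
    by_cases hbig : index_in * 8 > (list_in.length : Int)
    · -- A early-returns at i = 0; B's bounds check returns the list unchanged
      rw [if_pos hbig]
      rw [PySem.List.pyRange_one_cons (by omega : (0:Int) < 8 * num_lines_in)]
      rw [List.foldl_cons]
      have hstep : pvStepA index_in (Sum.inl list_in) 0 = Sum.inr list_in := by
        simp only [pvStepA]
        rw [if_neg (by omega), if_pos (by omega)]
      rw [hstep, pvStepA_inr]
    · rw [if_neg hbig]
      push_neg at hbig
      set s : Nat := (index_in * 8).toNat with hs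
      set N : Nat := (8 * num_lines_in).toNat with hN
      have hsle : s ≤ list_in.length := by omega
      have hpreLen : (list_in.take s).length = s := by simp [hsle]
      have hsplitl : list_in = list_in.take s ++ list_in.drop s := (List.take_append_drop s list_in).symm
      have hr0 : PySem.List.pyRange 0 (8 * num_lines_in) 1
          = PySem.List.pyRange 0 ((0:Int) + (N:Int)) 1 := by
        congr 1; omega
      have h1 : (PySem.List.pyRange 0 (8 * num_lines_in) 1).foldl (pvStepA index_in) (Sum.inl list_in)
          = Sum.inl (list_in.take s ++ List.replicate N 0 ++ (list_in.drop s).drop N) := by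
        rw [hr0]
        conv_lhs => rw [hsplitl]
        exact pvLoop1 N 0 index_in (list_in.take s) (list_in.drop s) (by rw [hpreLen]; omega)
      rw [h1]
      show ((PySem.List.pyRange 0 (8 * num_lines_in) 1).foldl (pvStepA2 index_in num_lines_in)
          (list_in.take s ++ List.replicate N 0 ++ (list_in.drop s).drop N, value_in)).1 = _
      have h2 : ((PySem.List.pyRange 0 (8 * num_lines_in) 1).foldl (pvStepA2 index_in num_lines_in)
            (list_in.take s ++ List.replicate N 0 ++ (list_in.drop s).drop N, value_in)).1
          = list_in.take s ++ pvGreedy N value_in ++ (list_in.drop s).drop N := by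
        rw [hr0]
        exact pvLoop2 N 0 index_in num_lines_in (list_in.take s) ((list_in.drop s).drop N) value_in
          (by rw [hpreLen]; omega) (by omega)
      rw [h2]
      -- now the B side
      rw [pvBitsB num_lines_in _ hn]
      rw [pvGreedy_eq_bits]
      congr 1
      rw [List.drop_drop]
      congr 1
      omega
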